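-- pv_equiv track=rewrite | github.com/jh0shin/Algorithm | Algorithm/2022 kakao blind 2nd/strategy.py | match_score_time
-- ===== SOURCE A (Python) =====
-- from collections import deque
--
-- def match_score_time(waiting_line, user_info, SCORE_TH, TIME_TH):
--     # result of strategy
--     pairs = []
--
--     # get user score
--     waiting_list = []
--     for user in waiting_line:
--         waiting_list.append((-user['from'], user_info[user['id']], user['id']))
--     waiting_list.sort()
--     waiting_q = deque(waiting_list)
--
--     tmp = deque([])
--     while waiting_q:
--         tmp.append(waiting_q.pop())
--         if len(tmp) == 2:
--             if tmp[0][0] <= -TIME_TH or tmp[1][0] <= -TIME_TH: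
--                 pairs.append([tmp[0][2], tmp[1][2]])
--                 tmp.clear()
--             elif abs(tmp[0][1]-tmp[1][1]) <= SCORE_TH:
--                 pairs.append([tmp[0][2], tmp[1][2]])
--                 tmp.clear()
--             else:
--                 tmp.popleft()
--
--     return pairs
-- ===== SOURCE B (Python) =====
-- def match_score_time(waiting_line, user_info, SCORE_TH, TIME_TH):
--     # descending order = reversed ascending sort (tuples with equal sort keys are identical values)
--     order = sorted((-u['from'], user_info[u['id']], u['id']) for u in waiting_line)[::-1]
--     # stage 1: compute the start index of every emitted pair by index arithmetic
--     starts = []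
--     i = 0
--     while i + 1 < len(order):
--         if (order[i][0] <= -TIME_TH or order[i + 1][0] <= -TIME_TH
--                 or abs(order[i][1] - order[i + 1][1]) <= SCORE_TH):
--             starts.append(i)
--             i += 2
--         else:
--             i += 1
--     # stage 2: materialise the pairs from the indices
--     return [[order[i][2], order[i + 1][2]] for i in starts]
-- ===== Notes on version B (the rewrite author's own statement) =====
-- stated objective: alternative
-- what changed: Replaced A's two deques (pop-from-the-right queue plus a size-2 tmp buffer with append/clear/popleft) by a staged computation: an index-jumping loop over the reversed sorted array that records only pair START INDICES, followed by a comprehension that materialises the pairs from those indices.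
import Mathlib
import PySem

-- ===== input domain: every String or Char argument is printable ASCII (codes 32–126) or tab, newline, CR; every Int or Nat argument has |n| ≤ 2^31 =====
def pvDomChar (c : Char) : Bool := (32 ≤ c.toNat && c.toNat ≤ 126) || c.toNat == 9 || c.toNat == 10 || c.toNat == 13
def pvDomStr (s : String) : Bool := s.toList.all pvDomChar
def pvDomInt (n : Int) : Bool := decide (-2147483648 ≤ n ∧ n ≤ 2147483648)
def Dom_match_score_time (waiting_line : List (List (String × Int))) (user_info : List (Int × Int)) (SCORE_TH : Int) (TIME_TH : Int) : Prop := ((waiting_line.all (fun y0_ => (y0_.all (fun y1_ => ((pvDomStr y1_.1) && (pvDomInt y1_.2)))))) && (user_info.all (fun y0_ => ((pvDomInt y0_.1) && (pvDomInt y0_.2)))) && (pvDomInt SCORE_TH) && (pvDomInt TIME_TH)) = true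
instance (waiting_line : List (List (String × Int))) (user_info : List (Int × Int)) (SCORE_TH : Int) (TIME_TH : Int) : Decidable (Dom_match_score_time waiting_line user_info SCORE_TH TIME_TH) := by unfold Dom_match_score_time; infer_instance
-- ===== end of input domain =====

-- B replaces A's two deques (pop-from-the-right queue plus size-2 buffer) by a STAGED computation:
-- an index-jumping loop over the reversed sorted array recording only pair start indices, then a
-- comprehension materialising the pairs from those indices (objective: alternative).

-- ===== PORT A =====
-- shared helper: the tuple (-user['from'], user_info[user['id']], user['id']) both Pythons build.
-- getD 0 is only reached outside Pre_ (where the Python raises KeyError).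
def pvUserEntry (user_info : List (Int × Int)) (u : List (String × Int)) : Int × Int × Int :=
  let id := (PySem.Dict.mk u).getD "id" 0
  (-(PySem.Dict.mk u).getD "from" 0, (PySem.Dict.mk user_info).getD id 0, id)

-- key encoding Python's lexicographic comparison of the 3-tuple of ints: exact whenever every
-- component has absolute value ≤ 2^31 (Dom guarantees this; base 2^33 > twice the range).
def pvKey (x : Int × Int × Int) : Int :=
  (x.1 * 8589934592 + x.2.1) * 8589934592 + x.2.2

-- the 'while waiting_q: tmp.append(waiting_q.pop()); …' loop, popping from the right
def pvLoopA (SCORE_TH TIME_TH : Int) (q tmp : List (Int × Int × Int)) (pairs : List (List Int)) : List (List Int) :=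
  match _hq : q.getLast? with
  | none => pairs
  | some x =>
    match tmp ++ [x] with
    | [a, b] =>
      if a.1 ≤ -TIME_TH ∨ b.1 ≤ -TIME_TH then
        pvLoopA SCORE_TH TIME_TH q.dropLast [] (pairs ++ [[a.2.2, b.2.2]])
      else if |a.2.1 - b.2.1| ≤ SCORE_TH then
        pvLoopA SCORE_TH TIME_TH q.dropLast [] (pairs ++ [[a.2.2, b.2.2]])
      else
        pvLoopA SCORE_TH TIME_TH q.dropLast [b] pairs
    | t => pvLoopA SCORE_TH TIME_TH q.dropLast t pairs
termination_by q.length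
decreasing_by
  all_goals
    simp only [List.length_dropLast]
    have : q ≠ [] := by intro h; subst h; simp at _hq
    have : 0 < q.length := List.length_pos_iff.mpr this
    omega

def match_score_time (waiting_line : List (List (String × Int))) (user_info : List (Int × Int)) (SCORE_TH : Int) (TIME_TH : Int) : List (List Int) :=
  let waiting_list := waiting_line.foldl (fun acc u => acc ++ [pvUserEntry user_info u]) []
  pvLoopA SCORE_TH TIME_TH (PySem.List.sorted waiting_list pvKey false) [] []

-- ===== PORT B =====
-- stage 1: the 'while i + 1 < len(order)' loop collecting pair start indices; the loop state is
-- the position i, stepping +2 after a pair and +1 otherwise (walking the suffix keeps it structural)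
def pvStarts (SCORE_TH TIME_TH : Int) : List (Int × Int × Int) → Nat → List Nat
  | a :: b :: rest, i =>
    if a.1 ≤ -TIME_TH ∨ b.1 ≤ -TIME_TH ∨ |a.2.1 - b.2.1| ≤ SCORE_TH then
      i :: pvStarts SCORE_TH TIME_TH rest (i + 2)
    else
      pvStarts SCORE_TH TIME_TH (b :: rest) (i + 1)
  | _, _ => []

-- stage 2 element: [order[i][2], order[i+1][2]]; pyGet? is exact Python indexing, the getD
-- default is unreachable because stage 1 only emits in-range indices
def pvPairAt (order : List (Int × Int × Int)) (i : Nat) : List Int :=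
  [((PySem.List.pyGet? order (i : Int)).getD (0, 0, 0)).2.2,
   ((PySem.List.pyGet? order ((i : Int) + 1)).getD (0, 0, 0)).2.2]

def match_score_time_alt (waiting_line : List (List (String × Int))) (user_info : List (Int × Int)) (SCORE_TH : Int) (TIME_TH : Int) : List (List Int) :=
  let order := (PySem.List.slice? (PySem.List.sorted (waiting_line.map (pvUserEntry user_info)) pvKey false) none none (-1)).getD []
  (pvStarts SCORE_TH TIME_TH order 0).map (pvPairAt order)

-- ===== PRECONDITION & SPEC =====
-- Pre_ = exactly the inputs where every user dict has 'from' and 'id' and user_info has that id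
-- (otherwise the Python raises KeyError).
def Pre_match_score_time (waiting_line : List (List (String × Int))) (user_info : List (Int × Int)) (SCORE_TH : Int) (TIME_TH : Int) : Prop :=
  waiting_line.all (fun u =>
    ((PySem.Dict.mk u).get? "from").isSome &&
    (((PySem.Dict.mk u).get? "id").bind (fun i => (PySem.Dict.mk user_info).get? i)).isSome) = true
instance (waiting_line : List (List (String × Int))) (user_info : List (Int × Int)) (SCORE_TH : Int) (TIME_TH : Int) : Decidable (Pre_match_score_time waiting_line user_info SCORE_TH TIME_TH) := by unfold Pre_match_score_time; infer_instance

def pvWitness_match_score_time : (List (List (String × Int))) × (List (Int × Int)) × Int × Int :=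
  ([[("from", 1), ("id", 0)], [("from", 2), ("id", 1)]], [(0, 10), (1, 12)], 5, 100)

def Spec_match_score_time (waiting_line : List (List (String × Int))) (user_info : List (Int × Int)) (SCORE_TH : Int) (TIME_TH : Int) (out : List (List Int)) : Prop := out = match_score_time_alt waiting_line user_info SCORE_TH TIME_TH
instance (waiting_line : List (List (String × Int))) (user_info : List (Int × Int)) (SCORE_TH : Int) (TIME_TH : Int) (out : List (List Int)) : Decidable (Spec_match_score_time waiting_line user_info SCORE_TH TIME_TH out) := by unfold Spec_match_score_time; infer_instance

-- ===== CLAIM (what is proved, stated in full; the proofs are below) =====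
def Claim_equal_match_score_time : Prop := ∀ (waiting_line : List (List (String × Int))) (user_info : List (Int × Int)) (SCORE_TH : Int) (TIME_TH : Int), Dom_match_score_time waiting_line user_info SCORE_TH TIME_TH → Pre_match_score_time waiting_line user_info SCORE_TH TIME_TH → Spec_match_score_time waiting_line user_info SCORE_TH TIME_TH (match_score_time waiting_line user_info SCORE_TH TIME_TH)

-- ===== LEMMAS AND PROOFS =====

-- proof-side middle form: direct structural recursion over the descending list
def pvGo (S T : Int) : List (Int × Int × Int) → List (List Int)
  | a :: b :: rest =>
    if a.1 ≤ -T ∨ b.1 ≤ -T ∨ |a.2.1 - b.2.1| ≤ S then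
      [a.2.2, b.2.2] :: pvGo S T rest
    else
      pvGo S T (b :: rest)
  | _ => []

lemma pvLoopA_eq_pvGo (S T : Int) (q tmp : List (Int × Int × Int)) (pairs : List (List Int))
    (htmp : tmp = [] ∨ ∃ a, tmp = [a]) :
    pvLoopA S T q tmp pairs = pairs ++ pvGo S T (tmp ++ q.reverse) := by
  induction q using List.reverseRecOn generalizing tmp pairs with
  | nil =>
    rcases htmp with h | ⟨a, h⟩ <;> subst h <;> simp [pvLoopA, pvGo]
  | append_singleton ys x ih =>
    rw [pvLoopA]
    split
    · next heq => simp at heq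
    · next x1 heq =>
      obtain rfl : x = x1 := by simpa [List.getLast?_concat] using heq
      rw [List.reverse_append, List.reverse_singleton, List.singleton_append]
      rcases htmp with h | ⟨a, h⟩ <;> subst h
      · simp only [List.nil_append, List.dropLast_concat]
        exact ih [x] pairs (Or.inr ⟨x, rfl⟩)
      · simp only [List.cons_append, List.nil_append, List.dropLast_concat]
        rw [pvGo]
        by_cases h1 : a.1 ≤ -T ∨ x.1 ≤ -T
        · rw [if_pos h1, if_pos (by tauto)]
          rw [ih [] _ (Or.inl rfl)]
          simp
        · rw [if_neg h1]
          by_cases h2 : |a.2.1 - x.2.1| ≤ S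
          · rw [if_pos h2, if_pos (by tauto)]
            rw [ih [] _ (Or.inl rfl)]
            simp
          · rw [if_neg h2, if_neg (by tauto)]
            exact ih [x] pairs (Or.inr ⟨x, rfl⟩)

lemma pvPairAt_of_drop (order : List (Int × Int × Int)) (i : Nat) (a b : Int × Int × Int)
    (rest : List (Int × Int × Int)) (h : order.drop i = a :: b :: rest) :
    pvPairAt order i = [a.2.2, b.2.2] := by
  have ha : order[i]? = some a := by
    have h0 : (order.drop i)[0]? = some a := by rw [h]; rfl
    rwa [List.getElem?_drop, Nat.add_zero] at h0
  have hb : order[i+1]? = some b := by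
    have h1 : (order.drop i)[1]? = some b := by rw [h]; rfl
    rwa [List.getElem?_drop] at h1
  unfold pvPairAt
  rw [show ((i : Int) + 1) = ((i + 1 : Nat) : Int) by push_cast; ring]
  rw [PySem.List.pyGet?_natCast, PySem.List.pyGet?_natCast, ha, hb]
  rfl

lemma pvGo_eq_starts (S T : Int) (order l : List (Int × Int × Int)) (i : Nat)
    (hl : order.drop i = l) :
    pvGo S T l = (pvStarts S T l i).map (pvPairAt order) := by
  induction l using pvGo.induct S T generalizing i with
  | case1 a b rest hc ih =>
    have hrest : order.drop (i + 2) = rest := by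
      have := congrArg (List.drop 2) hl
      simpa [List.drop_drop, Nat.add_comm] using this
    rw [pvGo, if_pos hc, pvStarts, if_pos hc, List.map_cons,
      pvPairAt_of_drop order i a b rest hl, ih (i + 2) hrest]
  | case2 a b rest hc ih =>
    have hrest : order.drop (i + 1) = b :: rest := by
      have := congrArg (List.drop 1) hl
      simpa [List.drop_drop, Nat.add_comm] using this
    rw [pvGo, if_neg hc, pvStarts, if_neg hc, ih (i + 1) hrest]
  | case3 l h1 =>
    match l, h1 with
    | [], _ => simp [pvGo, pvStarts]
    | [x], _ => simp [pvGo, pvStarts]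
    | a :: b :: r, h1 => exact (h1 a b r rfl).elim

-- ===== VERDICT (by name: the statement is the Claim_ definition above) =====
theorem match_score_time_spec : Claim_equal_match_score_time := by
  intro waiting_line user_info SCORE_TH TIME_TH _hdom _hpre
  unfold Spec_match_score_time match_score_time match_score_time_alt
  rw [PySem.List.foldl_append_singleton_eq_map, List.nil_append,
    PySem.List.slice?_none_none_neg_one, Option.getD_some,
    pvLoopA_eq_pvGo _ _ _ _ _ (Or.inl rfl), List.nil_append, List.nil_append]
  exact pvGo_eq_starts SCORE_TH TIME_TH _ _ 0 List.drop_zero
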